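-- pv_equiv track=rewrite | github.com/thomas-xin/hyperchoron | hyperchoron.py | approximate_gcd
-- ===== SOURCE A (Python) =====
-- from math import ceil, inf, isqrt, sqrt, log2, gcd
--
-- def approximate_gcd(arr, min_value=8):
-- 	if not arr:
-- 		return 0, 0
--
-- 	# Check if any element is >= min_value
-- 	has_element_above_min = any(x >= min_value for x in arr)
-- 	if not has_element_above_min:
-- 		return gcd(*arr), len(arr)
--
-- 	# Collect non-zero elements
-- 	non_zero = [x for x in arr if x != 0]
-- 	if not non_zero:
-- 		return 0, 0  # All elements are zero
--
-- 	# Generate all possible divisors >= min_value from non-zero elements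
-- 	divisors = set()
-- 	for x in non_zero:
-- 		x_abs = abs(x)
-- 		# Find all divisors of x_abs
-- 		for i in range(1, int(isqrt(x_abs)) + 1):
-- 			if x_abs % i == 0:
-- 				if i >= min_value:
-- 					divisors.add(i)
-- 				counterpart = x_abs // i
-- 				if counterpart >= min_value:
-- 					divisors.add(counterpart)
--
-- 	# If there are no divisors >= min_value, return the GCD of all elements
-- 	if not divisors:
-- 		return gcd(*arr), len(arr)
--
-- 	# Sort divisors in descending order
-- 	sorted_divisors = sorted(divisors, reverse=True)
--
-- 	max_count = 0
-- 	candidates = []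
--
-- 	# Find the divisor(s) with the maximum count of divisible elements
-- 	for d in sorted_divisors:
-- 		count = 0
-- 		for x in arr:
-- 			if x % d == 0:
-- 				count += 1
-- 		if count > max_count:
-- 			max_count = count
-- 			candidates = [d]
-- 		elif count == max_count:
-- 			candidates.append(d)
--
-- 	# Now find the maximum GCD among the candidates
-- 	max_gcd = 0
-- 	for d in candidates:
-- 		elements = [x for x in arr if x % d == 0]
-- 		current_gcd = gcd(*elements)
-- 		if current_gcd > max_gcd:
-- 			max_gcd = current_gcd
--
-- 	return (max_gcd, len(arr) - max_count) if max_gcd >= min_value else (gcd(*arr), len(arr))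
-- ===== SOURCE B (Python) =====
-- from math import isqrt, gcd
--
-- def approximate_gcd(arr, min_value=8):
-- 	if not arr:
-- 		return 0, 0
--
-- 	if not any(x >= min_value for x in arr):
-- 		return gcd(*arr), len(arr)
--
-- 	zeros = sum(1 for x in arr if x == 0)
-- 	if zeros == len(arr):
-- 		return 0, 0
--
-- 	# One sieve pass: per-divisor counts and running gcds, no per-divisor rescans of arr.
-- 	counts = {}
-- 	gcds = {}
-- 	for x in arr:
-- 		if x == 0:
-- 			continue
-- 		a = abs(x)
-- 		for i in range(1, isqrt(a) + 1):
-- 			if a % i == 0: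
-- 				if i >= min_value:
-- 					counts[i] = counts.get(i, 0) + 1
-- 					gcds[i] = gcd(gcds.get(i, 0), x)
-- 				c = a // i
-- 				if c != i and c >= min_value:
-- 					counts[c] = counts.get(c, 0) + 1
-- 					gcds[c] = gcd(gcds.get(c, 0), x)
--
-- 	if not counts:
-- 		return gcd(*arr), len(arr)
--
-- 	best_count = 0
-- 	for c in counts.values():
-- 		if c > best_count:
-- 			best_count = c
-- 	max_gcd = 0
-- 	for d, g in gcds.items():
-- 		if counts[d] == best_count and g > max_gcd:
-- 			max_gcd = g
--
-- 	return (max_gcd, len(arr) - best_count - zeros) if max_gcd >= min_value else (gcd(*arr), len(arr))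
-- ===== Notes on version B (the rewrite author's own statement) =====
-- stated objective: faster
-- what changed: B accumulates per-divisor counts and running gcds in dictionaries during the single sqrt-divisor enumeration pass (adding the zero-element count once at the end), instead of A's rescan of the whole array for every collected divisor and again for every candidate.
import Mathlib
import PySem

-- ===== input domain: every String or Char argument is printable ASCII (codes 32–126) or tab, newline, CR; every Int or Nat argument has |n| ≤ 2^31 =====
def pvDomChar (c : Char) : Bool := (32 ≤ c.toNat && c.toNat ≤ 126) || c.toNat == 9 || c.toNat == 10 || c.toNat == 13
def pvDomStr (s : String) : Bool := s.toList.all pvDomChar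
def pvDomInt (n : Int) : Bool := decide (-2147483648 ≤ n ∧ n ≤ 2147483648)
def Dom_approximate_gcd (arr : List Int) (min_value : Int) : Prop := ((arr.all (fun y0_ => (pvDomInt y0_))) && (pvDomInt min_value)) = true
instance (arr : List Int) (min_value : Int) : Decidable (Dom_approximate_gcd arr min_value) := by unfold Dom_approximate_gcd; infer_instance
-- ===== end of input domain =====

-- B replaces A's per-divisor rescan of the whole array by per-divisor counts and running
-- gcds accumulated in dictionaries during the single divisor-enumeration pass (objective: faster).

-- ===== PORT A =====
-- math.gcd(*l): left fold of gcd starting from 0 (math.gcd() == 0, gcd(x) == |x|)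
def pygcd (l : List Int) : Int := l.foldl (fun g x => (Int.gcd g x : Int)) 0

-- the inner 'for i in range(1, isqrt(x_abs)+1)' loop of A collecting divisors into the set
def A_divisorsStep (min_value : Int) (s : PySem.Set Int) (x : Int) : PySem.Set Int :=
  let x_abs : Int := (x.natAbs : Int)
  (PySem.List.pyRange 1 ((Nat.sqrt x.natAbs : Int) + 1) 1).foldl (fun s i =>
    if PySem.Int.mod x_abs i = 0 then
      let s := if min_value ≤ i then PySem.Set.add s i else s
      let counterpart := PySem.Int.floordiv x_abs i
      if min_value ≤ counterpart then PySem.Set.add s counterpart else s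
    else s) s

-- A's 'for d in sorted_divisors' loop: running (max_count, candidates)
def A_select (arr : List Int) (sorted_divisors : List Int) : Int × List Int :=
  sorted_divisors.foldl (fun st d =>
    let count := arr.foldl (fun count x => if PySem.Int.mod x d = 0 then count + 1 else count) (0 : Int)
    if st.1 < count then (count, [d])
    else if count = st.1 then (st.1, st.2 ++ [d])
    else st) (0, [])

-- A's 'for d in candidates' loop: maximum gcd among candidates
def A_maxGcd (arr : List Int) (candidates : List Int) : Int :=
  candidates.foldl (fun max_gcd d =>
    let elements := arr.filter (fun x => PySem.Int.mod x d = 0)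
    let current_gcd := pygcd elements
    if max_gcd < current_gcd then current_gcd else max_gcd) 0

def approximate_gcd (arr : List Int) (min_value : Int) : List Int :=
  if arr = [] then [0, 0] else
  let has_element_above_min := arr.any (fun x => min_value ≤ x)
  if ¬ has_element_above_min then [pygcd arr, (arr.length : Int)] else
  let non_zero := arr.filter (fun x => x ≠ 0)
  if non_zero = [] then [0, 0] else
  let divisors : PySem.Set Int := non_zero.foldl (A_divisorsStep min_value) PySem.Set.empty
  if (divisors : List Int) = [] then [pygcd arr, (arr.length : Int)] else
  let sorted_divisors := PySem.List.sorted (divisors : List Int) (fun d => d) true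
  let r := A_select arr sorted_divisors
  let max_gcd := A_maxGcd arr r.2
  if min_value ≤ max_gcd then [max_gcd, (arr.length : Int) - r.1]
  else [pygcd arr, (arr.length : Int)]

-- ===== PORT B =====
-- B's sieve pass body: skip zeros, enumerate divisors of |x| once, bump count and fold gcd per divisor
def B_sieveStep (min_value : Int) (st : PySem.Dict Int Int × PySem.Dict Int Int) (x : Int) :
    PySem.Dict Int Int × PySem.Dict Int Int :=
  if x = 0 then st else
  let a : Int := (x.natAbs : Int)
  (PySem.List.pyRange 1 ((Nat.sqrt x.natAbs : Int) + 1) 1).foldl (fun st i =>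
    if PySem.Int.mod a i = 0 then
      let st := if min_value ≤ i then
          (st.1.insert i (st.1.getD i 0 + 1), st.2.insert i (Int.gcd (st.2.getD i 0) x : Int))
        else st
      let c := PySem.Int.floordiv a i
      if c ≠ i ∧ min_value ≤ c then
          (st.1.insert c (st.1.getD c 0 + 1), st.2.insert c (Int.gcd (st.2.getD c 0) x : Int))
      else st
    else st) st

def approximate_gcd_alt (arr : List Int) (min_value : Int) : List Int :=
  if arr = [] then [0, 0] else
  if ¬ arr.any (fun x => min_value ≤ x) then [pygcd arr, (arr.length : Int)] else
  let zeros := arr.foldl (fun z x => if x = 0 then z + 1 else z) (0 : Int)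
  if zeros = (arr.length : Int) then [0, 0] else
  let st := arr.foldl (B_sieveStep min_value) (PySem.Dict.empty, PySem.Dict.empty)
  let counts := st.1
  let gcds := st.2
  if counts.items = [] then [pygcd arr, (arr.length : Int)] else
  let best_count := counts.values.foldl (fun b c => if b < c then c else b) 0
  let max_gcd := gcds.items.foldl (fun mg p =>
      if counts.getD p.1 0 = best_count ∧ mg < p.2 then p.2 else mg) 0
  if min_value ≤ max_gcd then [max_gcd, (arr.length : Int) - best_count - zeros]
  else [pygcd arr, (arr.length : Int)]

-- ===== PRECONDITION & SPEC =====
def Spec_approximate_gcd (arr : List Int) (min_value : Int) (out : List Int) : Prop := out = approximate_gcd_alt arr min_value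
instance (arr : List Int) (min_value : Int) (out : List Int) : Decidable (Spec_approximate_gcd arr min_value out) := by unfold Spec_approximate_gcd; infer_instance

-- ===== CLAIM (what is proved, stated in full; the proofs are below) =====
def Claim_equal_approximate_gcd : Prop := ∀ (arr : List Int) (min_value : Int), Dom_approximate_gcd arr min_value → Spec_approximate_gcd arr min_value (approximate_gcd arr min_value)

-- ===== LEMMAS AND PROOFS =====

def keysA (mv a i : Int) : List Int :=
  if PySem.Int.mod a i = 0 then
    (if mv ≤ i then [i] else []) ++
    (if mv ≤ PySem.Int.floordiv a i then [PySem.Int.floordiv a i] else [])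
  else []

def keysB (mv a i : Int) : List Int :=
  if PySem.Int.mod a i = 0 then
    (if mv ≤ i then [i] else []) ++
    (if PySem.Int.floordiv a i ≠ i ∧ mv ≤ PySem.Int.floordiv a i then [PySem.Int.floordiv a i] else [])
  else []

def KA (mv x : Int) : List Int :=
  (PySem.List.pyRange 1 ((Nat.sqrt x.natAbs : Int) + 1) 1).flatMap (keysA mv (x.natAbs : Int))

def KB (mv x : Int) : List Int :=
  (PySem.List.pyRange 1 ((Nat.sqrt x.natAbs : Int) + 1) 1).flatMap (keysB mv (x.natAbs : Int))

theorem sqrt_pair (n d : Nat) (hn : 0 < n) (hd : d ∣ n) (hd1 : 0 < d) :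
    ∃ i : Nat, 0 < i ∧ i ≤ Nat.sqrt n ∧ i ∣ n ∧ (d = i ∨ d = n / i) := by
  by_cases h : d ≤ Nat.sqrt n
  · exact ⟨d, hd1, h, hd, Or.inl rfl⟩
  · obtain ⟨e, he⟩ := hd
    have hdd : n < d * d := by
      have := Nat.sqrt_lt'.mp (lt_of_not_ge h); nlinarith
    have hed : n / d = e := by rw [he]; exact Nat.mul_div_cancel_left e hd1
    refine ⟨n / d, ?_, ?_, Nat.div_dvd_of_dvd ⟨e, he⟩, Or.inr ?_⟩
    · exact (Nat.one_le_div_iff hd1).mpr (Nat.le_of_dvd hn ⟨e, he⟩)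
    · rw [hed]; exact Nat.le_sqrt.mpr (by nlinarith)
    · rw [Nat.div_div_self ⟨e, he⟩ (by omega)]

theorem mem_keysA (mv a i d : Int) :
    d ∈ keysA mv a i ↔ (PySem.Int.mod a i = 0 ∧
      ((mv ≤ i ∧ d = i) ∨ (mv ≤ PySem.Int.floordiv a i ∧ d = PySem.Int.floordiv a i))) := by
  unfold keysA
  split_ifs with h1 h2 h3 <;> simp_all

theorem mem_keysB (mv a i d : Int) :
    d ∈ keysB mv a i ↔ (PySem.Int.mod a i = 0 ∧
      ((mv ≤ i ∧ d = i) ∨ (PySem.Int.floordiv a i ≠ i ∧ mv ≤ PySem.Int.floordiv a i ∧ d = PySem.Int.floordiv a i))) := by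
  unfold keysB
  split_ifs with h1 h2 h3 <;> simp_all

theorem mem_KA (mv x d : Int) (hx : x ≠ 0) : d ∈ KA mv x ↔ (mv ≤ d ∧ 1 ≤ d ∧ d ∣ x) := by
  have hn : 0 < x.natAbs := Int.natAbs_pos.mpr hx
  unfold KA
  rw [List.mem_flatMap]
  constructor
  · rintro ⟨i, hir, hk⟩
    rw [PySem.List.mem_pyRange_one] at hir
    obtain ⟨hi1, hi2⟩ := hir
    have hi : i = ((i.toNat : Nat) : Int) := by omega
    rw [mem_keysA] at hk
    obtain ⟨hmod, hk⟩ := hk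
    have hdvd : i.toNat ∣ x.natAbs := by
      have := (PySem.Int.mod_eq_zero_iff_dvd _ _).mp hmod
      rw [hi] at this; exact_mod_cast this
    have hfd : PySem.Int.floordiv ((x.natAbs : Nat) : Int) i = ((x.natAbs / i.toNat : Nat) : Int) := by
      rw [hi]; exact PySem.Int.floordiv_natCast _ _
    rcases hk with ⟨hmv, rfl⟩ | ⟨hmv, rfl⟩
    · exact ⟨hmv, by omega, Int.dvd_natAbs.mp (by rw [hi]; exact_mod_cast hdvd)⟩
    · rw [hfd]
      have h1 : 1 ≤ x.natAbs / i.toNat :=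
        (Nat.one_le_div_iff (by omega)).mpr (Nat.le_of_dvd hn hdvd)
      refine ⟨by rw [hfd] at hmv; exact hmv, by exact_mod_cast h1, ?_⟩
      exact Int.dvd_natAbs.mp (by exact_mod_cast Nat.div_dvd_of_dvd hdvd)
  · rintro ⟨hmv, hd1, hdx⟩
    have hdvd : d.toNat ∣ x.natAbs := by
      have h2 : d ∣ (x.natAbs : Int) := Int.dvd_natAbs.mpr hdx
      have hd : d = ((d.toNat : Nat) : Int) := by omega
      rw [hd] at h2; exact_mod_cast h2
    obtain ⟨i, hi0, hile, hidvd, hcase⟩ := sqrt_pair x.natAbs d.toNat hn hdvd (by omega)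
    refine ⟨(i : Int), ?_, ?_⟩
    · rw [PySem.List.mem_pyRange_one]
      constructor
      · exact_mod_cast hi0
      · have : (i : Int) ≤ (Nat.sqrt x.natAbs : Int) := by exact_mod_cast hile
        omega
    · rw [mem_keysA]
      have hmod : PySem.Int.mod ((x.natAbs : Nat) : Int) (i : Int) = 0 := by
        rw [PySem.Int.mod_eq_zero_iff_dvd]; exact_mod_cast hidvd
      have hfd : PySem.Int.floordiv ((x.natAbs : Nat) : Int) (i : Int) = ((x.natAbs / i : Nat) : Int) :=
        PySem.Int.floordiv_natCast _ _
      refine ⟨hmod, ?_⟩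
      rcases hcase with h | h
      · left; constructor
        · rw [← show d = (i : Int) by omega]; exact hmv
        · omega
      · right
        have hdv : d = ((x.natAbs / i : Nat) : Int) := by omega
        rw [hfd, ← hdv]; exact ⟨hmv, rfl⟩
theorem mem_KB (mv x d : Int) (hx : x ≠ 0) : d ∈ KB mv x ↔ (mv ≤ d ∧ 1 ≤ d ∧ d ∣ x) := by
  have hn : 0 < x.natAbs := Int.natAbs_pos.mpr hx
  unfold KB
  rw [List.mem_flatMap]
  constructor
  · rintro ⟨i, hir, hk⟩
    rw [PySem.List.mem_pyRange_one] at hir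
    obtain ⟨hi1, hi2⟩ := hir
    have hi : i = ((i.toNat : Nat) : Int) := by omega
    rw [mem_keysB] at hk
    obtain ⟨hmod, hk⟩ := hk
    have hdvd : i.toNat ∣ x.natAbs := by
      have := (PySem.Int.mod_eq_zero_iff_dvd _ _).mp hmod
      rw [hi] at this; exact_mod_cast this
    have hfd : PySem.Int.floordiv ((x.natAbs : Nat) : Int) i = ((x.natAbs / i.toNat : Nat) : Int) := by
      rw [hi]; exact PySem.Int.floordiv_natCast _ _
    rcases hk with ⟨hmv, rfl⟩ | ⟨_, hmv, rfl⟩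
    · exact ⟨hmv, by omega, Int.dvd_natAbs.mp (by rw [hi]; exact_mod_cast hdvd)⟩
    · rw [hfd]
      have h1 : 1 ≤ x.natAbs / i.toNat :=
        (Nat.one_le_div_iff (by omega)).mpr (Nat.le_of_dvd hn hdvd)
      refine ⟨by rw [hfd] at hmv; exact hmv, by exact_mod_cast h1, ?_⟩
      exact Int.dvd_natAbs.mp (by exact_mod_cast Nat.div_dvd_of_dvd hdvd)
  · rintro ⟨hmv, hd1, hdx⟩
    have hdvd : d.toNat ∣ x.natAbs := by
      have h2 : d ∣ (x.natAbs : Int) := Int.dvd_natAbs.mpr hdx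
      have hd : d = ((d.toNat : Nat) : Int) := by omega
      rw [hd] at h2; exact_mod_cast h2
    obtain ⟨i, hi0, hile, hidvd, hcase⟩ := sqrt_pair x.natAbs d.toNat hn hdvd (by omega)
    refine ⟨(i : Int), ?_, ?_⟩
    · rw [PySem.List.mem_pyRange_one]
      constructor
      · exact_mod_cast hi0
      · have : (i : Int) ≤ (Nat.sqrt x.natAbs : Int) := by exact_mod_cast hile
        omega
    · rw [mem_keysB]
      have hmod : PySem.Int.mod ((x.natAbs : Nat) : Int) (i : Int) = 0 := by
        rw [PySem.Int.mod_eq_zero_iff_dvd]; exact_mod_cast hidvd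
      have hfd : PySem.Int.floordiv ((x.natAbs : Nat) : Int) (i : Int) = ((x.natAbs / i : Nat) : Int) :=
        PySem.Int.floordiv_natCast _ _
      refine ⟨hmod, ?_⟩
      by_cases hci : PySem.Int.floordiv ((x.natAbs : Nat) : Int) (i : Int) = (i : Int)
      · -- counterpart equals i: d must be i in either case
        left
        have hdi : d = (i : Int) := by
          rcases hcase with h | h
          · omega
          · have : ((x.natAbs / i : Nat) : Int) = (i : Int) := by rw [← hfd]; exact hci
            omega
        exact ⟨by rw [← hdi]; exact hmv, hdi⟩
      · rcases hcase with h | h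
        · left; exact ⟨by rw [← show d = (i : Int) by omega]; exact hmv, by omega⟩
        · right
          have hdv : d = ((x.natAbs / i : Nat) : Int) := by omega
          rw [hfd, ← hdv]; exact ⟨by omega, hmv, rfl⟩

-- counterpart entries with the ≠-guard lie strictly above the square root
theorem counterpart_gt_sqrt (n k : Nat) (hn : 0 < n) (_hk1 : 0 < k) (hks : k ≤ Nat.sqrt n)
    (hkd : k ∣ n) (hne : n / k ≠ k) : Nat.sqrt n < n / k := by
  have hmul : n / k * k = n := Nat.div_mul_cancel hkd
  have hs2 : Nat.sqrt n * Nat.sqrt n ≤ n := by nlinarith [Nat.sqrt_le' n]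
  by_contra hle
  push Not at hle
  have h1 : n / k * k ≤ Nat.sqrt n * Nat.sqrt n := Nat.mul_le_mul hle hks
  have h2 : n = Nat.sqrt n * Nat.sqrt n := by omega
  have hspos : 0 < Nat.sqrt n := by
    rcases Nat.eq_zero_or_pos (Nat.sqrt n) with h | h
    · rw [h] at h2; omega
    · exact h
  have h3 : Nat.sqrt n * Nat.sqrt n ≤ n / k * Nat.sqrt n := by
    calc Nat.sqrt n * Nat.sqrt n = n / k * k := by omega
      _ ≤ n / k * Nat.sqrt n := Nat.mul_le_mul_left _ hks
  have h4 : Nat.sqrt n ≤ n / k := Nat.le_of_mul_le_mul_right h3 hspos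
  have h5 : n / k = Nat.sqrt n := by omega
  rw [h5] at hmul
  have h6 : Nat.sqrt n * k = Nat.sqrt n * Nat.sqrt n := by omega
  have h7 : k = Nat.sqrt n := Nat.eq_of_mul_eq_mul_left hspos h6
  omega

theorem nodup_KB (mv x : Int) (hx : x ≠ 0) : (KB mv x).Nodup := by
  have hn : 0 < x.natAbs := Int.natAbs_pos.mpr hx
  unfold KB
  rw [List.nodup_flatMap]
  constructor
  · intro i _
    unfold keysB
    split_ifs with h1 h2 h3 <;> simp_all <;> omega
  · have hpw := PySem.List.pairwise_lt_pyRange_one (a := (1:Int)) (b := ((Nat.sqrt x.natAbs : Int) + 1))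
    refine hpw.imp_of_mem ?_
    intro i j hi hj hij
    rw [PySem.List.mem_pyRange_one] at hi hj
    have key : ∀ k d : Int, 1 ≤ k → k ≤ (Nat.sqrt x.natAbs : Int) → d ∈ keysB mv ((x.natAbs : Nat) : Int) k →
        (d = k) ∨ (PySem.Int.floordiv ((x.natAbs : Nat) : Int) k = d ∧ (Nat.sqrt x.natAbs : Int) < d ∧ k ∣ ((x.natAbs : Nat) : Int)) := by
      intro k d _hk1 hk2 hd
      rw [mem_keysB] at hd
      obtain ⟨hmod, hd⟩ := hd
      have hk : k = ((k.toNat : Nat) : Int) := by omega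
      have hkdvd : k.toNat ∣ x.natAbs := by
        have := (PySem.Int.mod_eq_zero_iff_dvd _ _).mp hmod
        rw [hk] at this; exact_mod_cast this
      have hfd : PySem.Int.floordiv ((x.natAbs : Nat) : Int) k = ((x.natAbs / k.toNat : Nat) : Int) := by
        rw [hk]; exact PySem.Int.floordiv_natCast _ _
      rcases hd with ⟨_, rfl⟩ | ⟨hne, _, rfl⟩
      · exact Or.inl rfl
      · right
        refine ⟨rfl, ?_, by rw [hk]; exact_mod_cast hkdvd⟩
        have hneN : x.natAbs / k.toNat ≠ k.toNat := by
          intro hh; apply hne; rw [hfd, hh, ← hk]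
        have hksN : k.toNat ≤ Nat.sqrt x.natAbs := by omega
        have := counterpart_gt_sqrt x.natAbs k.toNat hn (by omega) hksN hkdvd hneN
        rw [hfd]; exact_mod_cast this
    intro d hdi hdj
    have h1 := key i d (by omega) (by omega) hdi
    have h2 := key j d (by omega) (by omega) hdj
    rcases h1 with rfl | ⟨hfi, hgei, hdvi⟩
    · rcases h2 with rfl | ⟨_, hge, _⟩
      · omega
      · omega
    · rcases h2 with rfl | ⟨hfj, hgej, hdvj⟩
      · omega
      · have hi2 : i = ((i.toNat : Nat) : Int) := by omega
        have hj2 : j = ((j.toNat : Nat) : Int) := by omega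
        have hdvi2 : i.toNat ∣ x.natAbs := by rw [hi2] at hdvi; exact_mod_cast hdvi
        have hdvj2 : j.toNat ∣ x.natAbs := by rw [hj2] at hdvj; exact_mod_cast hdvj
        have hfi2 : PySem.Int.floordiv ((x.natAbs : Nat) : Int) i = ((x.natAbs / i.toNat : Nat) : Int) := by
          rw [hi2]; exact PySem.Int.floordiv_natCast _ _
        have hfj2 : PySem.Int.floordiv ((x.natAbs : Nat) : Int) j = ((x.natAbs / j.toNat : Nat) : Int) := by
          rw [hj2]; exact PySem.Int.floordiv_natCast _ _
        have heq : x.natAbs / i.toNat = x.natAbs / j.toNat := by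
          have := hfi.trans hfj.symm
          rw [hfi2, hfj2] at this; exact_mod_cast this
        have : i.toNat = j.toNat := by
          have h3 := Nat.div_div_self hdvi2 (by omega)
          have h4 := Nat.div_div_self hdvj2 (by omega)
          rw [heq] at h3; rw [h3] at h4; omega
        omega

-- ===== generic loop-shape lemmas =====
theorem foldl_nest {σ α κ : Type} (F : σ → κ → σ) (g : α → List κ) (l : List α) (s : σ) :
    l.foldl (fun s x => (g x).foldl F s) s = (l.flatMap g).foldl F s := by
  induction l generalizing s with
  | nil => rfl
  | cons x t ih => simp only [List.foldl_cons, List.flatMap_cons, List.foldl_append, ih]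

theorem foldl_nest_pair {σ α κ : Type} (F : σ → κ → α → σ) (g : α → List κ) (l : List α) (s : σ) :
    l.foldl (fun s x => (g x).foldl (fun s k => F s k x) s) s
      = (l.flatMap (fun x => (g x).map (fun k => (k, x)))).foldl (fun s p => F s p.1 p.2) s := by
  induction l generalizing s with
  | nil => rfl
  | cons x t ih => simp only [List.foldl_cons, List.flatMap_cons, List.foldl_append, List.foldl_map, ih]

theorem if_lt_eq_max (m v : Int) : (if m < v then v else m) = max m v := by
  rw [max_def]; split_ifs <;> omega

-- ===== A-side characterizations =====
theorem A_divisorsStep_eq (mv : Int) (s : PySem.Set Int) (x : Int) :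
    A_divisorsStep mv s x = (KA mv x).foldl PySem.Set.add s := by
  unfold A_divisorsStep KA
  rw [← foldl_nest]
  apply PySem.List.foldl_congr_mem
  intro acc i _
  show _ = (keysA mv ((x.natAbs : Nat) : Int) i).foldl PySem.Set.add acc
  dsimp only
  unfold keysA
  split_ifs <;> rfl

theorem A_divisors_eq (arr : List Int) (mv : Int) :
    (arr.filter (fun x => x ≠ 0)).foldl (A_divisorsStep mv) PySem.Set.empty
      = PySem.Set.ofList ((arr.filter (fun x => x ≠ 0)).flatMap (KA mv)) := by
  rw [PySem.Set.ofList_eq_foldl, ← foldl_nest]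
  apply PySem.List.foldl_congr_mem
  intro acc x _
  exact A_divisorsStep_eq mv acc x

-- running count of A's inner count loop
def cntA (arr : List Int) (d : Int) : Int :=
  arr.foldl (fun count x => if PySem.Int.mod x d = 0 then count + 1 else count) (0 : Int)

theorem cntA_eq (arr : List Int) (d : Int) :
    cntA arr d = ((arr.countP (fun x => decide (d ∣ x))) : Int) := by
  unfold cntA
  rw [PySem.List.foldl_ite_add_one (fun x => PySem.Int.mod x d = 0)]
  have hc : List.countP (fun x => decide (PySem.Int.mod x d = 0)) arr
      = List.countP (fun x => decide (d ∣ x)) arr :=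
    List.countP_congr (fun x _ => by simp [PySem.Int.mod_eq_zero_iff_dvd])
  rw [hc]
  simp

theorem A_select_eq (arr : List Int) (l : List Int) :
    A_select arr l
      = l.foldl (fun st d =>
          if st.1 < cntA arr d then (cntA arr d, [d])
          else if cntA arr d = st.1 then (st.1, st.2 ++ [d]) else st) ((0 : Int), ([] : List Int)) := rfl

theorem foldl_select (c : Int → Int) (l : List Int) :
    l.foldl (fun st d => if st.1 < c d then (c d, [d]) else if c d = st.1 then (st.1, st.2 ++ [d]) else st)
      ((0 : Int), ([] : List Int))
    = (l.foldl (fun m d => max m (c d)) 0,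
       l.filter (fun d => decide (c d = l.foldl (fun m d => max m (c d)) 0))) := by
  induction l using List.reverseRecOn with
  | nil => simp
  | append_singleton t d ih =>
    have hb := PySem.List.le_foldl_max_int t c 0
    simp only [List.foldl_append, List.foldl_cons, List.foldl_nil, List.filter_append, ih]
    by_cases h1 : t.foldl (fun m d => max m (c d)) 0 < c d
    · rw [if_pos h1]
      have hM : max (t.foldl (fun m d => max m (c d)) 0) (c d) = c d := max_eq_right (le_of_lt h1)
      rw [hM]
      have hfe : t.filter (fun e => decide (c e = c d)) = [] := by
        rw [List.filter_eq_nil_iff]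
        intro e he
        have := hb.2 e he
        simp only [decide_eq_true_eq]
        omega
      simp [hfe]
    · rw [if_neg h1]
      have hM : max (t.foldl (fun m d => max m (c d)) 0) (c d) = t.foldl (fun m d => max m (c d)) 0 := by
        omega
      rw [hM]
      by_cases h2 : c d = t.foldl (fun m d => max m (c d)) 0
      · rw [if_pos h2]
        simp [h2]
      · rw [if_neg h2]
        have : (List.filter (fun e => decide (c e = t.foldl (fun m d => max m (c d)) 0)) [d]) = [] := by
          simp [h2]
        simp [this]

theorem A_maxGcd_eq (arr : List Int) (cs : List Int) :
    A_maxGcd arr cs = cs.foldl (fun m d => max m (pygcd (arr.filter (fun x => PySem.Int.mod x d = 0)))) 0 := by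
  unfold A_maxGcd
  apply PySem.List.foldl_congr_mem
  intro acc d _
  exact if_lt_eq_max acc _

-- counting over arr splits into nonzero part plus the zeros (every d divides 0)
theorem countP_dvd_split (l : List Int) (d : Int) :
    l.countP (fun x => decide (d ∣ x))
      = (l.filter (fun x => x ≠ 0)).countP (fun x => decide (d ∣ x)) + l.countP (fun x => decide (x = 0)) := by
  induction l with
  | nil => simp
  | cons x t ih =>
    by_cases hx : x = 0
    · subst hx
      simp only [List.countP_cons, List.filter_cons, decide_eq_true_eq]
      simp [ih]
      omega
    · simp only [List.countP_cons, List.filter_cons, decide_eq_true_eq]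
      simp only [if_pos (by simpa using hx)]
      by_cases hd : d ∣ x <;> simp [hd, hx, ih] <;> omega

-- pygcd ignores zero elements (running gcd stays nonnegative)
theorem foldl_gcd_filter_ne_zero (l : List Int) : ∀ g0 : Int, 0 ≤ g0 →
    l.foldl (fun g x => (Int.gcd g x : Int)) g0
      = (l.filter (fun x => x ≠ 0)).foldl (fun g x => (Int.gcd g x : Int)) g0 := by
  induction l with
  | nil => intro g0 _; rfl
  | cons x t ih =>
    intro g0 hg0
    by_cases hx : x = 0
    · subst hx
      simp only [List.foldl_cons, List.filter_cons]
      rw [Int.gcd_zero_right]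
      rw [Int.natAbs_of_nonneg hg0]
      simp only [decide_eq_true_eq]
      rw [if_neg (by simp)]
      exact ih g0 hg0
    · simp only [List.foldl_cons, List.filter_cons, decide_eq_true_eq]
      rw [if_pos (by simpa using hx)]
      simp only [List.foldl_cons]
      exact ih _ (by positivity)

theorem pygcd_elements_eq (arr : List Int) (d : Int) :
    pygcd (arr.filter (fun x => PySem.Int.mod x d = 0))
      = pygcd (((arr.filter (fun x => x ≠ 0)).filter (fun x => decide (d ∣ x)))) := by
  unfold pygcd
  rw [List.filter_congr (fun x _ => by
    show decide (PySem.Int.mod x d = 0) = decide (d ∣ x)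
    simp [PySem.Int.mod_eq_zero_iff_dvd])]
  rw [foldl_gcd_filter_ne_zero _ 0 le_rfl, List.filter_comm]

-- ===== B-side characterizations =====
-- B's per-(divisor, element) dictionary update
def Fupd (st : PySem.Dict Int Int × PySem.Dict Int Int) (p : Int × Int) :
    PySem.Dict Int Int × PySem.Dict Int Int :=
  (st.1.insert p.1 (st.1.getD p.1 0 + 1), st.2.insert p.1 (Int.gcd (st.2.getD p.1 0) p.2 : Int))

def pairsOf (mv : Int) (arr : List Int) : List (Int × Int) :=
  (arr.filter (fun x => x ≠ 0)).flatMap (fun x => (KB mv x).map (fun k => (k, x)))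

theorem B_sieveStep_eq (mv : Int) (st : PySem.Dict Int Int × PySem.Dict Int Int) (x : Int) (hx : ¬ x = 0) :
    B_sieveStep mv st x = (KB mv x).foldl (fun st k => Fupd st (k, x)) st := by
  unfold B_sieveStep KB
  rw [if_neg hx, ← foldl_nest]
  apply PySem.List.foldl_congr_mem
  intro acc i _
  show _ = (keysB mv ((x.natAbs : Nat) : Int) i).foldl (fun st k => Fupd st (k, x)) acc
  dsimp only
  unfold keysB Fupd
  split_ifs <;> rfl

theorem B_fold_eq (mv : Int) (arr : List Int) :
    arr.foldl (B_sieveStep mv) (PySem.Dict.empty, PySem.Dict.empty)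
      = (pairsOf mv arr).foldl Fupd (PySem.Dict.empty, PySem.Dict.empty) := by
  have h1 : arr.foldl (B_sieveStep mv) (PySem.Dict.empty, PySem.Dict.empty)
      = arr.foldl (fun st x => if x ≠ 0 then (KB mv x).foldl (fun st k => Fupd st (k, x)) st else st)
          (PySem.Dict.empty, PySem.Dict.empty) := by
    apply PySem.List.foldl_congr_mem
    intro acc x _
    by_cases hx : x = 0
    · subst hx; simp [B_sieveStep]
    · rw [if_pos hx, B_sieveStep_eq mv acc x hx]
  rw [h1, PySem.List.foldl_ite_eq_foldl_filter (fun x => x ≠ 0)]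
  unfold pairsOf
  rw [← foldl_nest_pair (fun s k x => Fupd s (k, x))]

theorem pairfold_fst (ps : List (Int × Int)) : ∀ st : PySem.Dict Int Int × PySem.Dict Int Int,
    (ps.foldl Fupd st).1 = ps.foldl (fun d p => d.insert p.1 (d.getD p.1 0 + 1)) st.1 := by
  induction ps with
  | nil => intro st; rfl
  | cons p t ih => intro st; simp only [List.foldl_cons, ih]; rfl

theorem pairfold_snd (ps : List (Int × Int)) : ∀ st : PySem.Dict Int Int × PySem.Dict Int Int,
    (ps.foldl Fupd st).2 = ps.foldl (fun d p => d.insert p.1 (Int.gcd (d.getD p.1 0) p.2 : Int)) st.2 := by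
  induction ps with
  | nil => intro st; rfl
  | cons p t ih => intro st; simp only [List.foldl_cons, ih]; rfl

theorem getD_countfold (ps : List (Int × Int)) (q : Int) : ∀ d0 : PySem.Dict Int Int,
    (ps.foldl (fun d p => d.insert p.1 (d.getD p.1 0 + 1)) d0).getD q 0
      = d0.getD q 0 + ((ps.countP (fun p => decide (p.1 = q))) : Int) := by
  induction ps with
  | nil => intro d0; simp
  | cons p t ih =>
    intro d0
    simp only [List.foldl_cons, List.countP_cons]
    rw [ih, PySem.Dict.getD_insert]
    by_cases h : q = p.1
    · subst h
      rw [if_pos rfl]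
      have hd : decide (p.1 = p.1) = true := by simp
      rw [hd]
      simp only [if_true]
      push_cast
      omega
    · rw [if_neg h]
      have hd : decide (p.1 = q) = false := by
        simp only [decide_eq_false_iff_not]
        exact fun hh => h hh.symm
      rw [hd]
      simp only [Bool.false_eq_true, if_false]
      push_cast
      omega

theorem getD_gcdfold (ps : List (Int × Int)) (q : Int) : ∀ d0 : PySem.Dict Int Int,
    (ps.foldl (fun d p => d.insert p.1 (Int.gcd (d.getD p.1 0) p.2 : Int)) d0).getD q 0
      = ((ps.filter (fun p => decide (p.1 = q))).map Prod.snd).foldl (fun g x => (Int.gcd g x : Int)) (d0.getD q 0) := by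
  induction ps with
  | nil => intro d0; rfl
  | cons p t ih =>
    intro d0
    simp only [List.foldl_cons, List.filter_cons]
    by_cases h : p.1 = q
    · rw [if_pos (by simp [h])]
      simp only [List.map_cons, List.foldl_cons]
      rw [ih]
      congr 1
      rw [PySem.Dict.getD_insert, if_pos h.symm, h]
    · rw [if_neg (by simp [h])]
      rw [ih]
      congr 1
      rw [PySem.Dict.getD_insert, if_neg (fun hh => h hh.symm)]

theorem keys_countfold (ps : List (Int × Int)) :
    (ps.foldl (fun d p => d.insert p.1 (d.getD p.1 0 + 1)) (PySem.Dict.empty : PySem.Dict Int Int)).keys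
      = PySem.Set.ofList (ps.map (fun p => p.1)) := by
  rw [PySem.Dict.keys_foldl_insert_key ps (fun p => p.1) (fun d p => d.getD p.1 0 + 1) (PySem.Dict.empty : PySem.Dict Int Int)]
  rw [show (PySem.Dict.empty : PySem.Dict Int Int).keys = [] from rfl, PySem.Set.update_nil_left]

theorem keys_gcdfold (ps : List (Int × Int)) :
    (ps.foldl (fun d p => d.insert p.1 (Int.gcd (d.getD p.1 0) p.2 : Int)) PySem.Dict.empty).keys
      = PySem.Set.ofList (ps.map (fun p => p.1)) := by
  rw [PySem.Dict.keys_foldl_insert_key ps (fun p => p.1) (fun d p => (Int.gcd (d.getD p.1 0) p.2 : Int)) (PySem.Dict.empty : PySem.Dict Int Int)]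
  rw [show (PySem.Dict.empty : PySem.Dict Int Int).keys = [] from rfl, PySem.Set.update_nil_left]

theorem nodup_filter_eq {l : List Int} (h : l.Nodup) (q : Int) :
    l.filter (fun y => decide (y = q)) = if q ∈ l then [q] else [] := by
  induction l with
  | nil => simp
  | cons a t ih =>
    rw [List.nodup_cons] at h
    simp only [List.filter_cons, List.mem_cons]
    by_cases haq : a = q
    · subst haq
      rw [if_pos (by simp), ih h.2, if_neg h.1, if_pos (Or.inl rfl)]
    · rw [if_neg (by simp [haq]), ih h.2]
      by_cases hq : q ∈ t
      · rw [if_pos hq, if_pos (Or.inr hq)]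
      · rw [if_neg hq, if_neg (by rintro (h | h); exact haq h.symm; exact hq h)]

theorem countP_pairs_aux (mv q : Int) (l : List Int) (h : ∀ x ∈ l, x ≠ 0) :
    (l.flatMap (fun x => (KB mv x).map (fun k => (k, x)))).countP (fun p => decide (p.1 = q))
      = l.countP (fun x => decide (q ∈ KB mv x)) := by
  induction l with
  | nil => rfl
  | cons x t ih =>
    simp only [List.flatMap_cons, List.countP_append, List.countP_cons]
    rw [ih (fun y hy => h y (List.mem_cons_of_mem _ hy))]
    have hx : x ≠ 0 := h x List.mem_cons_self
    have h1 : ((KB mv x).map (fun k => (k, x))).countP (fun p => decide (p.1 = q))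
        = (KB mv x).countP (fun k => decide (k = q)) := by
      rw [List.countP_map]; rfl
    have h2 : (KB mv x).countP (fun k => decide (k = q)) = if q ∈ KB mv x then 1 else 0 := by
      rw [List.countP_eq_length_filter, nodup_filter_eq (nodup_KB mv x hx) q]
      by_cases hq : q ∈ KB mv x <;> simp [hq]
    rw [h1, h2]
    by_cases hq : q ∈ KB mv x <;> simp [hq] <;> omega

theorem pairs_filter_aux (mv q : Int) (l : List Int) (h : ∀ x ∈ l, x ≠ 0) :
    ((l.flatMap (fun x => (KB mv x).map (fun k => (k, x)))).filter (fun p => decide (p.1 = q))).map Prod.snd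
      = l.filter (fun x => decide (q ∈ KB mv x)) := by
  induction l with
  | nil => rfl
  | cons x t ih =>
    simp only [List.flatMap_cons, List.filter_append, List.map_append, List.filter_cons]
    rw [ih (fun y hy => h y (List.mem_cons_of_mem _ hy))]
    have hx : x ≠ 0 := h x List.mem_cons_self
    have h1 : (((KB mv x).map (fun k => (k, x))).filter (fun p => decide (p.1 = q))).map Prod.snd
        = if q ∈ KB mv x then [x] else [] := by
      rw [List.filter_map]
      rw [show ((fun (p : Int × Int) => decide (p.1 = q)) ∘ (fun k => (k, x))) = (fun k => decide (k = q)) from rfl]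
      rw [nodup_filter_eq (nodup_KB mv x hx) q]
      by_cases hq : q ∈ KB mv x <;> simp [hq]
    rw [h1]
    by_cases hq : q ∈ KB mv x <;> simp [hq]

-- ===== max-fold lemmas =====
theorem foldl_max_add (f : Int → Int) (z : Int) (t : List Int) : ∀ a : Int,
    t.foldl (fun m d => max m (f d + z)) (a + z) = t.foldl (fun m d => max m (f d)) a + z := by
  induction t with
  | nil => intro a; rfl
  | cons d t ih =>
    intro a
    simp only [List.foldl_cons]
    rw [max_add_add_right]
    exact ih _

theorem foldl_max_shift (f : Int → Int) (z : Int) (l : List Int) (hz : 0 ≤ z) (hne : l ≠ [])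
    (hf : ∀ d ∈ l, 0 ≤ f d) :
    l.foldl (fun m d => max m (f d + z)) 0 = l.foldl (fun m d => max m (f d)) 0 + z := by
  cases l with
  | nil => exact absurd rfl hne
  | cons d t =>
    have hd : 0 ≤ f d := hf d List.mem_cons_self
    simp only [List.foldl_cons]
    rw [max_eq_right (by omega : (0:Int) ≤ f d + z), max_eq_right hd, ← foldl_max_add]

theorem perm_foldl_max (g : Int → Int) {l1 l2 : List Int} (hp : l1.Perm l2) :
    l1.foldl (fun m d => max m (g d)) 0 = l2.foldl (fun m d => max m (g d)) 0 := by
  haveI : RightCommutative (fun (m : Int) d => max m (g d)) :=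
    ⟨fun b a1 a2 => max_right_comm b (g a1) (g a2)⟩
  exact hp.foldl_eq 0

-- ===== canonical quantities both programs compute =====
def cntN (arr : List Int) (d : Int) : Nat :=
  (arr.filter (fun x => x ≠ 0)).countP (fun x => decide (d ∣ x))

def gN (arr : List Int) (d : Int) : Int :=
  pygcd ((arr.filter (fun x => x ≠ 0)).filter (fun x => decide (d ∣ x)))

def zerosN (arr : List Int) : Nat := arr.countP (fun x => decide (x = 0))

-- the divisor condition both programs enumerate
def DP (arr : List Int) (mv q : Int) : Prop :=
  mv ≤ q ∧ 1 ≤ q ∧ ∃ x ∈ arr.filter (fun x => x ≠ 0), q ∣ x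

theorem hnzmem (arr : List Int) : ∀ x ∈ arr.filter (fun x => x ≠ 0), x ≠ 0 := by
  intro x hx
  simpa using (List.mem_filter.mp hx).2

theorem mem_flatKA (mv : Int) (arr : List Int) (q : Int) :
    q ∈ (arr.filter (fun x => x ≠ 0)).flatMap (KA mv) ↔ DP arr mv q := by
  rw [List.mem_flatMap]
  constructor
  · rintro ⟨x, hx, hq⟩
    have h := (mem_KA mv x q (hnzmem arr x hx)).mp hq
    exact ⟨h.1, h.2.1, x, hx, h.2.2⟩
  · rintro ⟨h1, h2, x, hx, hd⟩
    exact ⟨x, hx, (mem_KA mv x q (hnzmem arr x hx)).mpr ⟨h1, h2, hd⟩⟩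

theorem mem_flatKB (mv : Int) (arr : List Int) (q : Int) :
    q ∈ (arr.filter (fun x => x ≠ 0)).flatMap (KB mv) ↔ DP arr mv q := by
  rw [List.mem_flatMap]
  constructor
  · rintro ⟨x, hx, hq⟩
    have h := (mem_KB mv x q (hnzmem arr x hx)).mp hq
    exact ⟨h.1, h.2.1, x, hx, h.2.2⟩
  · rintro ⟨h1, h2, x, hx, hd⟩
    exact ⟨x, hx, (mem_KB mv x q (hnzmem arr x hx)).mpr ⟨h1, h2, hd⟩⟩

-- ===== characterizing B's dictionaries =====
theorem C_eq (mv : Int) (arr : List Int) :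
    (arr.foldl (B_sieveStep mv) (PySem.Dict.empty, PySem.Dict.empty)).1
      = (pairsOf mv arr).foldl (fun d p => d.insert p.1 (d.getD p.1 0 + 1)) PySem.Dict.empty := by
  rw [B_fold_eq, pairfold_fst]

theorem G_eq (mv : Int) (arr : List Int) :
    (arr.foldl (B_sieveStep mv) (PySem.Dict.empty, PySem.Dict.empty)).2
      = (pairsOf mv arr).foldl (fun d p => d.insert p.1 (Int.gcd (d.getD p.1 0) p.2 : Int)) PySem.Dict.empty := by
  rw [B_fold_eq, pairfold_snd]

theorem pairsOf_map_fst (mv : Int) (arr : List Int) :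
    (pairsOf mv arr).map (fun p => p.1) = (arr.filter (fun x => x ≠ 0)).flatMap (KB mv) := by
  unfold pairsOf
  rw [List.map_flatMap]
  congr 1
  funext x
  rw [List.map_map]
  exact List.map_id _

theorem C_keys_eq (mv : Int) (arr : List Int) :
    (arr.foldl (B_sieveStep mv) (PySem.Dict.empty, PySem.Dict.empty)).1.keys
      = PySem.Set.ofList ((arr.filter (fun x => x ≠ 0)).flatMap (KB mv)) := by
  rw [C_eq]
  refine (keys_countfold (pairsOf mv arr)).trans ?_
  rw [pairsOf_map_fst]

theorem G_keys_eq (mv : Int) (arr : List Int) :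
    (arr.foldl (B_sieveStep mv) (PySem.Dict.empty, PySem.Dict.empty)).2.keys
      = PySem.Set.ofList ((arr.filter (fun x => x ≠ 0)).flatMap (KB mv)) := by
  rw [G_eq]
  refine (keys_gcdfold (pairsOf mv arr)).trans ?_
  rw [pairsOf_map_fst]

theorem C_getD_good (mv : Int) (arr : List Int) (q : Int) (h1 : mv ≤ q) (h2 : 1 ≤ q) :
    ((arr.foldl (B_sieveStep mv) (PySem.Dict.empty, PySem.Dict.empty)).1).getD q 0
      = (cntN arr q : Int) := by
  rw [C_eq, getD_countfold]
  have he : (PySem.Dict.empty : PySem.Dict Int Int).getD q 0 = 0 := rfl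
  rw [he]
  have hc : (pairsOf mv arr).countP (fun p => decide (p.1 = q))
      = (arr.filter (fun x => x ≠ 0)).countP (fun x => decide (q ∈ KB mv x)) := by
    unfold pairsOf
    exact countP_pairs_aux mv q _ (hnzmem arr)
  rw [hc]
  unfold cntN
  have : (arr.filter (fun x => x ≠ 0)).countP (fun x => decide (q ∈ KB mv x))
      = (arr.filter (fun x => x ≠ 0)).countP (fun x => decide (q ∣ x)) := by
    apply List.countP_congr
    intro x hx
    simp only [decide_eq_true_eq]
    rw [mem_KB mv x q (hnzmem arr x hx)]
    constructor
    · exact fun h => h.2.2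
    · exact fun h => ⟨h1, h2, h⟩
  rw [this]
  omega

theorem G_getD_good (mv : Int) (arr : List Int) (q : Int) (h1 : mv ≤ q) (h2 : 1 ≤ q) :
    ((arr.foldl (B_sieveStep mv) (PySem.Dict.empty, PySem.Dict.empty)).2).getD q 0
      = gN arr q := by
  rw [G_eq, getD_gcdfold]
  have he : (PySem.Dict.empty : PySem.Dict Int Int).getD q 0 = 0 := rfl
  rw [he]
  have hf : ((pairsOf mv arr).filter (fun p => decide (p.1 = q))).map Prod.snd
      = (arr.filter (fun x => x ≠ 0)).filter (fun x => decide (q ∈ KB mv x)) := by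
    unfold pairsOf
    exact pairs_filter_aux mv q _ (hnzmem arr)
  rw [hf]
  have : (arr.filter (fun x => x ≠ 0)).filter (fun x => decide (q ∈ KB mv x))
      = (arr.filter (fun x => x ≠ 0)).filter (fun x => decide (q ∣ x)) := by
    apply List.filter_congr
    intro x hx
    simp only [decide_eq_decide]
    rw [mem_KB mv x q (hnzmem arr x hx)]
    constructor
    · exact fun h => h.2.2
    · exact fun h => ⟨h1, h2, h⟩
  rw [this]
  rfl

-- A's count over the whole array, written through cntN and zerosN
theorem cntA_split (arr : List Int) (d : Int) :
    cntA arr d = (cntN arr d : Int) + (zerosN arr : Int) := by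
  rw [cntA_eq, countP_dvd_split arr d]
  unfold cntN zerosN
  push_cast
  ring

theorem pygcd_elements_gN (arr : List Int) (d : Int) :
    pygcd (arr.filter (fun x => PySem.Int.mod x d = 0)) = gN arr d := by
  rw [pygcd_elements_eq]
  rfl

theorem cond_max (b : Prop) [Decidable b] (acc v : Int) :
    (if b ∧ acc < v then v else acc) = (if b then max acc v else acc) := by
  by_cases hb : b <;> by_cases hv : acc < v <;> simp [hb, hv, max_def] <;> omega

-- the maximal count (without zeros) and the best gcd, as B computes them
def MBv (mv : Int) (arr : List Int) : Int :=
  (PySem.Set.ofList ((arr.filter (fun x => x ≠ 0)).flatMap (KB mv))).foldl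
    (fun m k => max m ((cntN arr k : Int))) 0

def BGv (mv : Int) (arr : List Int) : Int :=
  ((PySem.Set.ofList ((arr.filter (fun x => x ≠ 0)).flatMap (KB mv))).filter
      (fun k => decide ((cntN arr k : Int) = MBv mv arr))).foldl
    (fun m k => max m (gN arr k)) 0

theorem guard_iff (mv : Int) (arr : List Int) :
    ((PySem.Set.ofList ((arr.filter (fun x => x ≠ 0)).flatMap (KA mv)) : List Int) = [])
      ↔ ((arr.foldl (B_sieveStep mv) (PySem.Dict.empty, PySem.Dict.empty)).1.items = []) := by
  have hkeys : (arr.foldl (B_sieveStep mv) (PySem.Dict.empty, PySem.Dict.empty)).1.keys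
      = (arr.foldl (B_sieveStep mv) (PySem.Dict.empty, PySem.Dict.empty)).1.items.map (fun p => p.1) := rfl
  constructor
  · intro h
    have hno : ∀ q, ¬ DP arr mv q := by
      intro q hq
      have hmem : q ∈ (PySem.Set.ofList ((arr.filter (fun x => x ≠ 0)).flatMap (KA mv)) : List Int) :=
        (PySem.Set.mem_ofList _ _).mpr ((mem_flatKA mv arr q).mpr hq)
      rw [h] at hmem
      simp at hmem
    have hk : (arr.foldl (B_sieveStep mv) (PySem.Dict.empty, PySem.Dict.empty)).1.keys = [] := by
      rw [C_keys_eq, List.eq_nil_iff_forall_not_mem]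
      intro q hq
      exact hno q ((mem_flatKB mv arr q).mp ((PySem.Set.mem_ofList _ _).mp hq))
    rw [hkeys] at hk
    exact List.map_eq_nil_iff.mp hk
  · intro h
    have hk : (arr.foldl (B_sieveStep mv) (PySem.Dict.empty, PySem.Dict.empty)).1.keys = [] := by
      rw [hkeys, h]; rfl
    rw [C_keys_eq] at hk
    rw [List.eq_nil_iff_forall_not_mem]
    intro q hq
    have hq2 : DP arr mv q := (mem_flatKA mv arr q).mp ((PySem.Set.mem_ofList _ _).mp hq)
    have : q ∈ PySem.Set.ofList ((arr.filter (fun x => x ≠ 0)).flatMap (KB mv)) :=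
      (PySem.Set.mem_ofList _ _).mpr ((mem_flatKB mv arr q).mpr hq2)
    rw [hk] at this
    simp at this

theorem S_perm_KS (mv : Int) (arr : List Int) :
    (PySem.List.sorted (PySem.Set.ofList ((arr.filter (fun x => x ≠ 0)).flatMap (KA mv)) : List Int) (fun d => d) true).Perm
      (PySem.Set.ofList ((arr.filter (fun x => x ≠ 0)).flatMap (KB mv))) := by
  have h1 := PySem.List.sorted_perm (PySem.Set.ofList ((arr.filter (fun x => x ≠ 0)).flatMap (KA mv)) : List Int) (fun d => d) true
  refine (List.perm_ext_iff_of_nodup (h1.nodup_iff.mpr (PySem.Set.nodup_ofList _)) (PySem.Set.nodup_ofList _)).mpr ?_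
  intro q
  rw [h1.mem_iff]
  rw [PySem.Set.mem_ofList, PySem.Set.mem_ofList, mem_flatKA, mem_flatKB]

theorem KS_mem (mv : Int) (arr : List Int) (q : Int) :
    q ∈ (PySem.Set.ofList ((arr.filter (fun x => x ≠ 0)).flatMap (KB mv)) : List Int) ↔ DP arr mv q := by
  rw [PySem.Set.mem_ofList, mem_flatKB]

theorem A_select_char (mv : Int) (arr : List Int)
    (hdiv : ¬ ((PySem.Set.ofList ((arr.filter (fun x => x ≠ 0)).flatMap (KA mv)) : List Int) = [])) :
    A_select arr (PySem.List.sorted (PySem.Set.ofList ((arr.filter (fun x => x ≠ 0)).flatMap (KA mv)) : List Int) (fun d => d) true)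
      = (MBv mv arr + (zerosN arr : Int),
         (PySem.List.sorted (PySem.Set.ofList ((arr.filter (fun x => x ≠ 0)).flatMap (KA mv)) : List Int) (fun d => d) true).filter
           (fun d => decide ((cntN arr d : Int) = MBv mv arr))) := by
  rw [A_select_eq, foldl_select]
  have hSne : (PySem.List.sorted (PySem.Set.ofList ((arr.filter (fun x => x ≠ 0)).flatMap (KA mv)) : List Int) (fun d => d) true) ≠ [] :=
    fun h => hdiv ((PySem.List.sorted_eq_nil_iff _ _ _).mp h)
  have hM : (PySem.List.sorted (PySem.Set.ofList ((arr.filter (fun x => x ≠ 0)).flatMap (KA mv)) : List Int) (fun d => d) true).foldl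
      (fun m d => max m (cntA arr d)) 0 = MBv mv arr + (zerosN arr : Int) := by
    have h1 : (PySem.List.sorted (PySem.Set.ofList ((arr.filter (fun x => x ≠ 0)).flatMap (KA mv)) : List Int) (fun d => d) true).foldl
        (fun m d => max m (cntA arr d)) 0
        = (PySem.List.sorted (PySem.Set.ofList ((arr.filter (fun x => x ≠ 0)).flatMap (KA mv)) : List Int) (fun d => d) true).foldl
        (fun m d => max m ((cntN arr d : Int) + (zerosN arr : Int))) 0 := by
      apply PySem.List.foldl_congr_mem
      intro acc d _
      rw [cntA_split]
    rw [h1, foldl_max_shift (fun d => (cntN arr d : Int)) ((zerosN arr : Int)) _ (by positivity) hSne (fun d _ => by positivity)]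
    congr 1
    exact perm_foldl_max (fun k => (cntN arr k : Int)) (S_perm_KS mv arr)
  rw [Prod.mk.injEq]
  refine ⟨hM, ?_⟩
  apply List.filter_congr
  intro d _
  simp only [decide_eq_decide]
  rw [cntA_split, hM]
  omega

theorem A_gcd_char (mv : Int) (arr : List Int) :
    A_maxGcd arr
      ((PySem.List.sorted (PySem.Set.ofList ((arr.filter (fun x => x ≠ 0)).flatMap (KA mv)) : List Int) (fun d => d) true).filter
        (fun d => decide ((cntN arr d : Int) = MBv mv arr)))
      = BGv mv arr := by
  rw [A_maxGcd_eq]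
  have h1 : ∀ (l : List Int), l.foldl (fun m d => max m (pygcd (arr.filter (fun x => PySem.Int.mod x d = 0)))) 0
      = l.foldl (fun m d => max m (gN arr d)) 0 := by
    intro l
    apply PySem.List.foldl_congr_mem
    intro acc d _
    rw [pygcd_elements_gN]
  rw [h1]
  exact perm_foldl_max (gN arr) ((S_perm_KS mv arr).filter _)

theorem B_best_char (mv : Int) (arr : List Int) :
    (arr.foldl (B_sieveStep mv) (PySem.Dict.empty, PySem.Dict.empty)).1.values.foldl
      (fun b c => if b < c then c else b) 0 = MBv mv arr := by
  have hCnodup : (arr.foldl (B_sieveStep mv) (PySem.Dict.empty, PySem.Dict.empty)).1.keys.Nodup := by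
    rw [C_keys_eq]; exact PySem.Set.nodup_ofList _
  rw [PySem.Dict.values_eq_map_keys _ hCnodup 0, List.foldl_map, C_keys_eq]
  unfold MBv
  apply PySem.List.foldl_congr_mem
  intro acc k hk
  have hd : DP arr mv k := (KS_mem mv arr k).mp hk
  rw [if_lt_eq_max, C_getD_good mv arr k hd.1 hd.2.1]

theorem B_gcd_char (mv : Int) (arr : List Int) :
    (arr.foldl (B_sieveStep mv) (PySem.Dict.empty, PySem.Dict.empty)).2.items.foldl
      (fun mg p => if (arr.foldl (B_sieveStep mv) (PySem.Dict.empty, PySem.Dict.empty)).1.getD p.1 0 = MBv mv arr ∧ mg < p.2 then p.2 else mg) 0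
      = BGv mv arr := by
  have hGnodup : (arr.foldl (B_sieveStep mv) (PySem.Dict.empty, PySem.Dict.empty)).2.keys.Nodup := by
    rw [G_keys_eq]; exact PySem.Set.nodup_ofList _
  have h1 : (arr.foldl (B_sieveStep mv) (PySem.Dict.empty, PySem.Dict.empty)).2.items.foldl
      (fun mg p => if (arr.foldl (B_sieveStep mv) (PySem.Dict.empty, PySem.Dict.empty)).1.getD p.1 0 = MBv mv arr ∧ mg < p.2 then p.2 else mg) 0
      = (arr.foldl (B_sieveStep mv) (PySem.Dict.empty, PySem.Dict.empty)).2.items.foldl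
      (fun mg p => if (arr.foldl (B_sieveStep mv) (PySem.Dict.empty, PySem.Dict.empty)).1.getD p.1 0 = MBv mv arr then max mg p.2 else mg) 0 := by
    apply PySem.List.foldl_congr_mem
    intro acc p _
    exact cond_max _ acc p.2
  rw [h1]
  rw [PySem.List.foldl_ite_eq_foldl_filter
    (fun p : Int × Int => (arr.foldl (B_sieveStep mv) (PySem.Dict.empty, PySem.Dict.empty)).1.getD p.1 0 = MBv mv arr)
    (fun mg p => max mg p.2)]
  rw [PySem.Dict.items_eq_map_keys _ hGnodup 0, List.filter_map, List.foldl_map, G_keys_eq]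
  have hfc : (PySem.Set.ofList ((arr.filter (fun x => x ≠ 0)).flatMap (KB mv)) : List Int).filter
      ((fun p : Int × Int => decide ((arr.foldl (B_sieveStep mv) (PySem.Dict.empty, PySem.Dict.empty)).1.getD p.1 0 = MBv mv arr)) ∘
        (fun k => (k, (arr.foldl (B_sieveStep mv) (PySem.Dict.empty, PySem.Dict.empty)).2.getD k 0)))
      = (PySem.Set.ofList ((arr.filter (fun x => x ≠ 0)).flatMap (KB mv)) : List Int).filter
        (fun k => decide ((cntN arr k : Int) = MBv mv arr)) := by
    apply List.filter_congr
    intro k hk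
    have hd : DP arr mv k := (KS_mem mv arr k).mp hk
    simp only [Function.comp_apply]
    rw [C_getD_good mv arr k hd.1 hd.2.1]
  rw [hfc]
  unfold BGv
  apply PySem.List.foldl_congr_mem
  intro acc k hk
  have hd : DP arr mv k := (KS_mem mv arr k).mp (List.mem_of_mem_filter hk)
  rw [G_getD_good mv arr k hd.1 hd.2.1]

theorem main_eq (arr : List Int) (mv : Int) : approximate_gcd arr mv = approximate_gcd_alt arr mv := by
  unfold approximate_gcd approximate_gcd_alt
  by_cases h0 : arr = []
  · rw [if_pos h0, if_pos h0]
  rw [if_neg h0, if_neg h0]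
  dsimp only
  by_cases hany : arr.any (fun x => mv ≤ x) = true
  case neg => rw [if_pos (by simpa using hany), if_pos (by simpa using hany)]
  rw [if_neg (not_not_intro hany), if_neg (not_not_intro hany)]
  have hzf : arr.foldl (fun z x => if x = 0 then z + 1 else z) (0:Int) = (zerosN arr : Int) := by
    rw [PySem.List.foldl_ite_add_one (fun x => x = 0), zero_add]
    rfl
  rw [hzf]
  by_cases hnz : arr.filter (fun x => x ≠ 0) = []
  · have hzl : zerosN arr = arr.length := by
      apply List.countP_eq_length.mpr
      intro x hx
      have h := List.filter_eq_nil_iff.mp hnz x hx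
      simp at h ⊢
      exact h
    rw [if_pos hnz, if_pos (by exact_mod_cast hzl)]
  have hBcond : ¬((zerosN arr : Int) = (arr.length : Int)) := by
    intro h
    apply hnz
    rw [List.filter_eq_nil_iff]
    intro x hx
    have hzl : zerosN arr = arr.length := by exact_mod_cast h
    have h2 := List.countP_eq_length.mp hzl x hx
    simp at h2 ⊢
    exact h2
  rw [if_neg hnz, if_neg hBcond]
  rw [A_divisors_eq arr mv]
  by_cases hdiv : (PySem.Set.ofList ((arr.filter (fun x => x ≠ 0)).flatMap (KA mv)) : List Int) = []
  · rw [if_pos hdiv, if_pos ((guard_iff mv arr).mp hdiv)]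
  rw [if_neg hdiv, if_neg (fun h => hdiv ((guard_iff mv arr).mpr h))]
  rw [B_best_char mv arr]
  rw [B_gcd_char mv arr]
  rw [A_select_char mv arr hdiv]
  dsimp only
  rw [A_gcd_char mv arr]
  by_cases hfin : mv ≤ BGv mv arr
  · rw [if_pos hfin, if_pos hfin, sub_add_eq_sub_sub]
  · rw [if_neg hfin, if_neg hfin]

-- ===== VERDICT (by name: the statement is the Claim_ definition above) =====
theorem approximate_gcd_spec : Claim_equal_approximate_gcd := by
  intro arr mv _
  unfold Spec_approximate_gcd
  exact main_eq arr mv
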